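-- pv_equiv track=rewrite | github.com/jdvelasq/techminer2 | docs_src/generate_docs.py | generate_index_mapping
-- ===== SOURCE A (Python) =====
-- def generate_index_mapping(files):
--     files = files[:]
--     files = [file for file in files if not file.endswith("__init__.py")]
--     mapping = {}
--     for file in files:
--         parts = file.split("/")
--         path = ".".join(parts[:-1])
--         filename = parts[-1]
--         if path not in mapping:
--             mapping[path] = []
--         mapping[path].append(filename)
--     return mapping
-- ===== SOURCE B (Python) =====
-- def generate_index_mapping(files):
--     keyed = []
--     for file in files:
--         if not file.endswith("__init__.py"):
--             parts = file.split("/")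
--             keyed.append((".".join(parts[:-1]), parts[-1]))
--     keys = list(dict.fromkeys([key for key, _ in keyed]))
--     return {key: [name for k, name in keyed if k == key] for key in keys}
-- ===== Notes on version B (the rewrite author's own statement) =====
-- stated objective: alternative
-- what changed: Replaces A's incremental check-and-append dict accumulation with a two-phase group-by: build the (path, filename) key list once, dedupe the keys in first-occurrence order, then collect each group's filenames by a per-key filter pass.
import Mathlib
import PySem

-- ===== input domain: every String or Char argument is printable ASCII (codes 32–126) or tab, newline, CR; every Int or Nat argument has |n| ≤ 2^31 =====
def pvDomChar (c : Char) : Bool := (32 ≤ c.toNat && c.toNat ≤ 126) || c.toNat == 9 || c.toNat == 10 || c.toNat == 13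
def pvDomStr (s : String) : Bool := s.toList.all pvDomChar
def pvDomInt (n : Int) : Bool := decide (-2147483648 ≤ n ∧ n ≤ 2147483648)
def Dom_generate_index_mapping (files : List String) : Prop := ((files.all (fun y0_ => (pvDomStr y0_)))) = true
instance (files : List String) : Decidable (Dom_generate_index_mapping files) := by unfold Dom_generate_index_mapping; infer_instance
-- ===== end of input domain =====

-- B replaces A's incremental check-and-append dict accumulation with a two-phase group-by
-- (key list, ordered key dedup, per-key filter); same result, no speed claim (objective: alternative).

-- ===== PORT A =====
-- file.split("/") with a nonempty separator always succeeds, so `.getD []` is never taken;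
-- parts is always nonempty, so the default "" of parts[-1] is never taken (Python raises on neither).
def generate_index_mapping (files : List String) : List (String × List String) :=
  let files := files
  let files := files.filter (fun file => !(PySem.Str.endswith file "__init__.py"))
  let mapping :=
    files.foldl (fun mapping file =>
      let parts := (PySem.Str.split? file "/").getD []
      let path := PySem.Str.join "." (PySem.List.slice parts none (some (-1)))
      let filename := PySem.List.pyGetD parts (-1) ""
      let mapping := if mapping.contains path then mapping else mapping.insert path ([] : List String)
      mapping.insert path (mapping.getD path [] ++ [filename]))
      (PySem.Dict.empty : PySem.Dict String (List String))
  mapping.items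

-- ===== PORT B =====
-- dict.fromkeys-dedup is PySem.List.dedup; the final dict comprehension ranges over the
-- already-distinct keys, so its items are exactly this map.
def generate_index_mapping_alt (files : List String) : List (String × List String) :=
  let keyed :=
    files.foldl (fun acc file =>
      if !(PySem.Str.endswith file "__init__.py") then
        let parts := (PySem.Str.split? file "/").getD []
        acc ++ [(PySem.Str.join "." (PySem.List.slice parts none (some (-1))),
                 PySem.List.pyGetD parts (-1) "")]
      else acc) []
  let keys := PySem.List.dedup (keyed.map (fun p => p.1))
  keys.map (fun key => (key, (keyed.filter (fun p => p.1 == key)).map (fun p => p.2)))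

-- ===== PRECONDITION & SPEC =====
def Spec_generate_index_mapping (files : List String) (out : List (String × List String)) : Prop := out = generate_index_mapping_alt files
instance (files : List String) (out : List (String × List String)) : Decidable (Spec_generate_index_mapping files out) := by unfold Spec_generate_index_mapping; infer_instance

-- ===== CLAIM (what is proved, stated in full; the proofs are below) =====
def Claim_equal_generate_index_mapping : Prop := ∀ (files : List String), Dom_generate_index_mapping files → Spec_generate_index_mapping files (generate_index_mapping files)

-- ===== LEMMAS AND PROOFS =====

-- the (path, filename) key both programs compute for one file
def pvKey (file : String) : String × String :=
  let parts := (PySem.Str.split? file "/").getD []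
  (PySem.Str.join "." (PySem.List.slice parts none (some (-1))),
   PySem.List.pyGetD parts (-1) "")

-- A's loop body (on an already-keyed pair) IS dict.modify
theorem pvStep_eq_modify (d : PySem.Dict String (List String)) (p : String × String) :
    (let d' := if d.contains p.1 then d else d.insert p.1 ([] : List String);
     d'.insert p.1 (d'.getD p.1 [] ++ [p.2])) = d.modify p.1 [] (· ++ [p.2]) := by
  by_cases h : d.contains p.1 = true
  · simp only [h, if_pos, PySem.Dict.modify]
  · simp only [Bool.not_eq_true] at h
    simp [h, PySem.Dict.insert_insert_self, PySem.Dict.getD_insert_self,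
      PySem.Dict.modify, PySem.Dict.getD_of_not_contains d _ h]

-- B's accumulation loop is filter-then-map of pvKey
theorem pvB_fold (files : List String) :
    List.foldl
      (fun acc file =>
        if (!PySem.Str.endswith file "__init__.py") = true then
          acc ++
            [(PySem.Str.join "." (PySem.List.slice ((PySem.Str.split? file "/").getD []) none (some (-1))),
                PySem.List.pyGetD ((PySem.Str.split? file "/").getD []) (-1) "")]
        else acc)
      [] files
    = (files.filter (fun file => !PySem.Str.endswith file "__init__.py")).map pvKey :=
  PySem.List.foldl_append_if _ pvKey files []

-- A's loop over the filtered files is the keyed list folded through dict.modify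
theorem pvA_fold (fs : List String) :
    List.foldl
      (fun mapping file =>
        (if
              mapping.contains
                  (PySem.Str.join "." (PySem.List.slice ((PySem.Str.split? file "/").getD []) none (some (-1)))) =
                true then
            mapping
          else
            mapping.insert
              (PySem.Str.join "." (PySem.List.slice ((PySem.Str.split? file "/").getD []) none (some (-1))))
              []).insert
          (PySem.Str.join "." (PySem.List.slice ((PySem.Str.split? file "/").getD []) none (some (-1))))
          ((if
                  mapping.contains
                      (PySem.Str.join "."
                        (PySem.List.slice ((PySem.Str.split? file "/").getD []) none (some (-1)))) =
                    true then
                mapping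
              else
                mapping.insert
                  (PySem.Str.join "." (PySem.List.slice ((PySem.Str.split? file "/").getD []) none (some (-1))))
                  []).getD
            (PySem.Str.join "." (PySem.List.slice ((PySem.Str.split? file "/").getD []) none (some (-1)))) [] ++
          [PySem.List.pyGetD ((PySem.Str.split? file "/").getD []) (-1) ""]))
      (PySem.Dict.empty : PySem.Dict String (List String)) fs
    = List.foldl (fun d p => d.modify p.1 [] (· ++ [p.2])) PySem.Dict.empty (fs.map pvKey) := by
  rw [List.foldl_map]
  congr 1
  funext d file
  exact pvStep_eq_modify d (pvKey file)

-- the grouping fold, characterised as dedup + per-key filter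
theorem pvGroup (L : List (String × String)) :
    (List.foldl (fun d p => d.modify p.1 [] (· ++ [p.2]))
        (PySem.Dict.empty : PySem.Dict String (List String)) L).items
      = (PySem.List.dedup (L.map (fun p => p.1))).map
          (fun key => (key, (L.filter (fun p => p.1 == key)).map (fun p => p.2))) := by
  have hkeys :
      (List.foldl (fun d p => d.modify p.1 [] (· ++ [p.2]))
        (PySem.Dict.empty : PySem.Dict String (List String)) L).keys
      = PySem.Set.update (PySem.Dict.empty : PySem.Dict String (List String)).keys
          (L.map (fun p => p.1)) :=
    PySem.Dict.keys_foldl_modify_key L (fun p => p.1) [] (fun _ p => (· ++ [p.2])) _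
  have hnd :
      (List.foldl (fun d p => d.modify p.1 [] (· ++ [p.2]))
        (PySem.Dict.empty : PySem.Dict String (List String)) L).keys.Nodup :=
    PySem.Dict.nodup_keys_foldl_modify_key L (fun p => p.1) [] (fun _ p => (· ++ [p.2])) _
      (by simp [PySem.Dict.keys_empty])
  rw [PySem.Dict.items_eq_map_keys _ hnd ([] : List String), hkeys]
  have hupd : PySem.Set.update (PySem.Dict.empty : PySem.Dict String (List String)).keys
      (L.map (fun p => p.1)) = PySem.List.dedup (L.map (fun p => p.1)) := by
    simp only [PySem.Dict.keys_empty, PySem.List.dedup_eq_ofList]; rfl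
  rw [hupd]
  refine List.map_congr_left (fun k _ => ?_)
  have := PySem.Dict.getD_foldl_modify_append L
      (PySem.Dict.empty : PySem.Dict String (List String)) k
  simp [PySem.Dict.getD_empty] at this
  simp [this]

-- ===== VERDICT (by name: the statement is the Claim_ definition above) =====
theorem generate_index_mapping_spec : Claim_equal_generate_index_mapping := by
  intro files _
  show generate_index_mapping files = generate_index_mapping_alt files
  unfold generate_index_mapping generate_index_mapping_alt
  simp only []
  rw [pvB_fold files, pvA_fold, pvGroup]
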